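-- pv_equiv track=rewrite | github.com/kuzmiigo/advent-of-code | 2020/21/prog.py | process
-- ===== SOURCE A (Python) =====
-- def process(input):
--     candidates = {}
--     counts = {}
--     for ingredients, allergens in input:
--         ings = set(ingredients)
--         for a in allergens:
--             if a in candidates:
--                 candidates[a].intersection_update(ings)
--             else:
--                 candidates[a] = ings.copy()
--         for i in ingredients:
--             counts[i] = counts.get(i, 0) + 1
--     return candidates, counts
-- ===== SOURCE B (Python) =====
-- def process(input):
--     # Three independent passes: ingredient counts; allergen first-occurrence
--     # order; then, per allergen, a direct scan intersecting the ingredient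
--     # sets of every line that mentions it.
--     counts = {}
--     for ingredients, _ in input:
--         for i in ingredients:
--             counts[i] = counts.get(i, 0) + 1
--     order = []
--     for _, allergens in input:
--         for a in allergens:
--             if a not in order:
--                 order.append(a)
--     candidates = {}
--     for a in order:
--         sets = [set(ings) for ings, alls in input if a in alls]
--         c = sets[0]
--         for s in sets[1:]:
--             c = c & s
--         candidates[a] = c
--     return candidates, counts
-- ===== Notes on version B (the rewrite author's own statement) =====
-- stated objective: alternative
-- what changed: A builds candidates and counts together in one online fold over the input, intersecting each allergen's running set line by line; B makes three independent passes (counts, allergen first-occurrence order, then per allergen a direct scan of the input intersecting the ingredient sets of the lines mentioning it), trading A's single-pass dict update for per-allergen rescans.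
import Mathlib
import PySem

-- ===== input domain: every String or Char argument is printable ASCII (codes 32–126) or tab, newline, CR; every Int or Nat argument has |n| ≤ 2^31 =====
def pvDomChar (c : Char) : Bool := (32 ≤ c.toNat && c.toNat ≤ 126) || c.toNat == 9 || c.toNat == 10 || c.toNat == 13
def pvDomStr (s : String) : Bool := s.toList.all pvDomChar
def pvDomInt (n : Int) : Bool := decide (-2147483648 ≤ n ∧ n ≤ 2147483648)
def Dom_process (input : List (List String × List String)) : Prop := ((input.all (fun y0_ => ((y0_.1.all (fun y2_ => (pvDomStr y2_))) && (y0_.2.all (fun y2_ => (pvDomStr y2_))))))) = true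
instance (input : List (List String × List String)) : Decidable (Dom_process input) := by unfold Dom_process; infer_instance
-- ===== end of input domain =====

-- B replaces A's single online fold by three independent passes: ingredient counts,
-- allergen first-occurrence order, then per allergen a direct scan intersecting the
-- ingredient sets of every line mentioning it (alternative decomposition, not faster).

-- ===== PORT A =====
def process (input : List (List String × List String)) : (List (String × List String)) × (List (String × Int)) :=
  let st := input.foldl
    (fun (st : PySem.Dict String (PySem.Set String) × PySem.Dict String Int) p =>
      let ings := PySem.Set.ofList p.1
      let cands := p.2.foldl (fun c a =>
        match PySem.Dict.get? c a with
        | some s => PySem.Dict.insert c a (PySem.Set.inter s ings)   -- candidates[a].intersection_update(ings)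
        | none   => PySem.Dict.insert c a ings) st.1                 -- candidates[a] = ings.copy()
      let counts := p.1.foldl (fun m i => PySem.Dict.insert m i (PySem.Dict.getD m i 0 + 1)) st.2
      (cands, counts))
    (PySem.Dict.empty, PySem.Dict.empty)
  (st.1.items, st.2.items)

-- ===== PORT B =====
-- c = sets[0]; for s in sets[1:]: c = c & s   — sets is nonempty whenever a ∈ order
-- (some line mentions a), so the [] branch is unreachable.
def redB (ls : List (PySem.Set String)) : PySem.Set String :=
  match ls with
  | [] => []
  | c :: rest => rest.foldl PySem.Set.inter c

def process_alt (input : List (List String × List String)) : (List (String × List String)) × (List (String × Int)) :=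
  -- pass 1: ingredient counts
  let counts := input.foldl
    (fun (m : PySem.Dict String Int) p =>
      p.1.foldl (fun m i => PySem.Dict.insert m i (PySem.Dict.getD m i 0 + 1)) m)
    PySem.Dict.empty
  -- pass 2: allergens in first-occurrence order  (if a not in order: order.append(a))
  let order := input.foldl
    (fun (ord : List String) p =>
      p.2.foldl (fun ord a => if ord.contains a then ord else ord ++ [a]) ord)
    []
  -- pass 3: per allergen, intersect the ingredient sets of the lines mentioning it
  let cands := order.foldl
    (fun (d : PySem.Dict String (PySem.Set String)) a =>
      let sets := input.filterMap (fun p =>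
        if p.2.contains a then some (PySem.Set.ofList p.1) else none)
      PySem.Dict.insert d a (redB sets))
    PySem.Dict.empty
  (cands.items, counts.items)

-- ===== PRECONDITION & SPEC =====
def Spec_process (input : List (List String × List String)) (out : (List (String × List String)) × (List (String × Int))) : Prop := out = process_alt input
instance (input : List (List String × List String)) (out : (List (String × List String)) × (List (String × Int))) : Decidable (Spec_process input out) := by unfold Spec_process; infer_instance

-- ===== CLAIM (what is proved, stated in full; the proofs are below) =====
def Claim_equal_process : Prop := ∀ (input : List (List String × List String)), Dom_process input → Spec_process input (process input)

-- ===== LEMMAS AND PROOFS =====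

/-- A dict whose items are an explicit key list with values given by a function. -/
def dictOf (ord : List String) (G : String → PySem.Set String) : PySem.Dict String (PySem.Set String) :=
  ⟨ord.map (fun a => (a, G a))⟩

/-- One step of B's order pass. -/
def ordStep (ord : List String) (a : String) : List String :=
  if ord.contains a then ord else ord ++ [a]

/-- Key order of the whole input: allergens in first occurrence order. -/
def keysOrder (l : List (List String × List String)) : List String :=
  l.foldl (fun ord p => p.2.foldl ordStep ord) []

/-- The ingredient sets of the lines mentioning `a`, in order. -/
def setsOf (l : List (List String × List String)) (a : String) : List (PySem.Set String) :=
  l.filterMap (fun p => if p.2.contains a then some (PySem.Set.ofList p.1) else none)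

def interAll (l : List (List String × List String)) (a : String) : PySem.Set String :=
  redB (setsOf l a)

theorem get?_dictOf (ord : List String) (G : String → PySem.Set String) (a : String) :
    (dictOf ord G).get? a = if a ∈ ord then some (G a) else none := by
  induction ord with
  | nil => rfl
  | cons b rest ih =>
    by_cases hb : b = a
    · subst hb; simp [dictOf, PySem.Dict.get?]
    · have hstep : (dictOf (b :: rest) G).get? a = (dictOf rest G).get? a := by
        simp [dictOf, PySem.Dict.get?, hb]
      have hmem : (a ∈ b :: rest) ↔ (a ∈ rest) := by
        simp only [List.mem_cons]
        exact ⟨fun h => h.elim (fun h' => absurd h'.symm hb) id, Or.inr⟩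
      rw [hstep, ih, if_congr hmem rfl rfl]

theorem contains_dictOf (ord : List String) (G : String → PySem.Set String) (a : String) :
    (dictOf ord G).contains a = ord.contains a := by
  have := get?_dictOf ord G a
  rw [PySem.Dict.contains_eq_isSome_get?, this]
  by_cases h : a ∈ ord <;> simp [h]

theorem insert_dictOf_mem (ord : List String) (G : String → PySem.Set String) {a : String}
    (h : a ∈ ord) (v : PySem.Set String) :
    (dictOf ord G).insert a v = dictOf ord (fun x => if x = a then v else G x) := by
  apply PySem.Dict.ext
  rw [PySem.Dict.items_insert, contains_dictOf, if_pos (by simpa using h)]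
  simp only [dictOf, List.map_map]
  apply List.map_congr_left
  intro x _
  by_cases hx : x = a
  · subst hx; simp
  · simp [hx]

theorem insert_dictOf_not_mem (ord : List String) (G : String → PySem.Set String) {a : String}
    (h : a ∉ ord) (v : PySem.Set String) :
    (dictOf ord G).insert a v = dictOf (ord ++ [a]) (fun x => if x = a then v else G x) := by
  apply PySem.Dict.ext
  rw [PySem.Dict.items_insert, contains_dictOf, if_neg (by simpa using h)]
  simp only [dictOf, List.map_append, List.map_cons, List.map_nil]
  congr 1
  apply List.map_congr_left
  intro x hx
  have : x ≠ a := fun hxa => h (hxa ▸ hx)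
  simp [this]

theorem inter_self (s : PySem.Set String) : PySem.Set.inter s s = s := by
  simp [PySem.Set.inter]

theorem inter_inter_self (x s : PySem.Set String) :
    PySem.Set.inter (PySem.Set.inter x s) s = PySem.Set.inter x s := by
  simp [PySem.Set.inter, List.filter_filter]

/-- The allergen loop of one of A's lines, acting on a dict in `dictOf` form. -/
theorem innerA_loop (s : PySem.Set String) (as : List String) :
    ∀ (ord : List String) (G : String → PySem.Set String),
    as.foldl (fun c a =>
        match PySem.Dict.get? c a with
        | some t => PySem.Dict.insert c a (PySem.Set.inter t s)
        | none   => PySem.Dict.insert c a s) (dictOf ord G)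
      = dictOf (as.foldl ordStep ord)
          (fun x => if x ∈ as then (if x ∈ ord then PySem.Set.inter (G x) s else s) else G x) := by
  induction as with
  | nil => intro ord G; simp [List.foldl]
  | cons b rest ih =>
    intro ord G
    simp only [List.foldl_cons]
    by_cases hb : b ∈ ord
    · have hget : PySem.Dict.get? (dictOf ord G) b = some (G b) := by
        rw [get?_dictOf, if_pos hb]
      have hstep : (match PySem.Dict.get? (dictOf ord G) b with
          | some t => PySem.Dict.insert (dictOf ord G) b (PySem.Set.inter t s)
          | none   => PySem.Dict.insert (dictOf ord G) b s)
          = dictOf ord (fun x => if x = b then PySem.Set.inter (G b) s else G x) := by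
        rw [hget]; exact insert_dictOf_mem ord G hb _
      rw [hstep, ih]
      have hord : ordStep ord b = ord := by simp [ordStep, hb]
      rw [hord]
      congr 1
      funext x
      by_cases hx : x = b
      · subst hx
        by_cases hr : x ∈ rest <;>
          simp [hr, hb, inter_inter_self]
      · simp [hx, List.mem_cons]
    · have hget : PySem.Dict.get? (dictOf ord G) b = none := by
        rw [get?_dictOf, if_neg hb]
      have hstep : (match PySem.Dict.get? (dictOf ord G) b with
          | some t => PySem.Dict.insert (dictOf ord G) b (PySem.Set.inter t s)
          | none   => PySem.Dict.insert (dictOf ord G) b s)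
          = dictOf (ord ++ [b]) (fun x => if x = b then s else G x) := by
        rw [hget]; exact insert_dictOf_not_mem ord G hb s
      rw [hstep, ih]
      have hord : ordStep ord b = ord ++ [b] := by simp [ordStep, hb]
      rw [hord]
      congr 1
      funext x
      by_cases hx : x = b
      · subst hx
        by_cases hr : x ∈ rest <;>
          simp [hr, hb, inter_self]
      · simp [hx, List.mem_cons, List.mem_append]

theorem mem_foldl_ordStep (as : List String) :
    ∀ (ord : List String) (x : String), x ∈ as.foldl ordStep ord ↔ x ∈ ord ∨ x ∈ as := by
  induction as with
  | nil => simp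
  | cons b rest ih =>
    intro ord x
    simp only [List.foldl_cons, ih, ordStep]
    by_cases hb : b ∈ ord <;>
      by_cases hx : x = b <;>
        simp [hb, hx, List.mem_append]

theorem nodup_foldl_ordStep (as : List String) :
    ∀ (ord : List String), ord.Nodup → (as.foldl ordStep ord).Nodup := by
  induction as with
  | nil => intro ord h; exact h
  | cons b rest ih =>
    intro ord h
    simp only [List.foldl_cons]
    apply ih
    by_cases hb : b ∈ ord
    · simpa [ordStep, hb] using h
    · unfold ordStep
      rw [if_neg (by simpa using hb), List.nodup_append]
      refine ⟨h, List.nodup_singleton _, fun a ha c hc => ?_⟩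
      intro hac
      rw [List.mem_singleton] at hc
      subst hc
      subst hac
      exact hb ha

theorem mem_keysOrder (l : List (List String × List String)) (x : String) :
    x ∈ keysOrder l ↔ ∃ p ∈ l, x ∈ p.2 := by
  unfold keysOrder
  suffices h : ∀ (ord : List String),
      x ∈ l.foldl (fun ord p => p.2.foldl ordStep ord) ord ↔ x ∈ ord ∨ ∃ p ∈ l, x ∈ p.2 by
    simpa using h []
  induction l with
  | nil => simp
  | cons q rest ih =>
    intro ord
    simp only [List.foldl_cons, ih, mem_foldl_ordStep, List.mem_cons]
    constructor
    · rintro ((h | h) | ⟨p, hp, hx⟩)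
      · exact Or.inl h
      · exact Or.inr ⟨q, Or.inl rfl, h⟩
      · exact Or.inr ⟨p, Or.inr hp, hx⟩
    · rintro (h | ⟨p, (rfl | hp), hx⟩)
      · exact Or.inl (Or.inl h)
      · exact Or.inl (Or.inr hx)
      · exact Or.inr ⟨p, hp, hx⟩

theorem nodup_keysOrder (l : List (List String × List String)) : (keysOrder l).Nodup := by
  unfold keysOrder
  suffices h : ∀ (ord : List String), ord.Nodup →
      (l.foldl (fun ord p => p.2.foldl ordStep ord) ord).Nodup by
    exact h [] List.nodup_nil
  induction l with
  | nil => intro ord h; exact h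
  | cons q rest ih =>
    intro ord h
    exact ih _ (nodup_foldl_ordStep q.2 ord h)

theorem setsOf_ne_nil_iff (l : List (List String × List String)) (x : String) :
    setsOf l x ≠ [] ↔ ∃ p ∈ l, x ∈ p.2 := by
  unfold setsOf
  rw [Ne, List.filterMap_eq_nil_iff]
  constructor
  · intro h
    by_contra hc
    apply h
    intro p hp
    have hx : x ∉ p.2 := fun hxm => hc ⟨p, hp, hxm⟩
    simp [hx]
  · rintro ⟨p, hp, hx⟩ h
    have := h p hp
    simp [hx] at this

theorem setsOf_append (l : List (List String × List String)) (p : List String × List String)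
    (x : String) :
    setsOf (l ++ [p]) x = setsOf l x ++ (if x ∈ p.2 then [PySem.Set.ofList p.1] else []) := by
  unfold setsOf
  rw [List.filterMap_append]
  congr 1
  by_cases hx : x ∈ p.2 <;> simp [hx]

theorem redB_append {ls : List (PySem.Set String)} (h : ls ≠ []) (s : PySem.Set String) :
    redB (ls ++ [s]) = PySem.Set.inter (redB ls) s := by
  obtain ⟨x, t, rfl⟩ := List.exists_cons_of_ne_nil h
  simp [redB, List.foldl_append]

/-- A's candidates fold, characterised: key list = first-occurrence allergen order,
    value at `a` = fold of intersections over the lines mentioning `a`. -/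
theorem candsA_eq (l : List (List String × List String)) :
    l.foldl (fun c p => p.2.foldl (fun c a =>
        match PySem.Dict.get? c a with
        | some s => PySem.Dict.insert c a (PySem.Set.inter s (PySem.Set.ofList p.1))
        | none   => PySem.Dict.insert c a (PySem.Set.ofList p.1)) c) PySem.Dict.empty
      = dictOf (keysOrder l) (interAll l) := by
  induction l using List.reverseRecOn with
  | nil => rfl
  | append_singleton xs p ih =>
    rw [List.foldl_append, List.foldl_cons, List.foldl_nil, ih,
        innerA_loop (PySem.Set.ofList p.1) p.2 (keysOrder xs) (interAll xs)]
    have hord : keysOrder (xs ++ [p]) = p.2.foldl ordStep (keysOrder xs) := by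
      unfold keysOrder; rw [List.foldl_append]; rfl
    rw [← hord]
    congr 1
    funext x
    by_cases hx : x ∈ p.2
    · have hsets : setsOf (xs ++ [p]) x = setsOf xs x ++ [PySem.Set.ofList p.1] := by
        rw [setsOf_append, if_pos hx]
      by_cases hk : x ∈ keysOrder xs
      · have hne : setsOf xs x ≠ [] :=
          (setsOf_ne_nil_iff xs x).mpr ((mem_keysOrder xs x).mp hk)
        simp [hx, hk, interAll, hsets, redB_append hne]
      · have hnil : setsOf xs x = [] := by
          by_contra hne
          exact hk ((mem_keysOrder xs x).mpr ((setsOf_ne_nil_iff xs x).mp hne))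
        simp [hx, hk, interAll, hsets, hnil, redB]
    · have hsets : setsOf (xs ++ [p]) x = setsOf xs x := by
        rw [setsOf_append, if_neg hx, List.append_nil]
      simp [hx, interAll, hsets]

/-- Folding fresh inserts over a nodup key list builds exactly `dictOf`. -/
theorem foldl_insert_fresh (F : String → PySem.Set String) (order : List String) :
    ∀ (done : List String) (G : String → PySem.Set String),
    (∀ a ∈ order, a ∉ done) → order.Nodup →
    order.foldl (fun d a => PySem.Dict.insert d a (F a)) (dictOf done G)
      = dictOf (done ++ order) (fun x => if x ∈ order then F x else G x) := by
  induction order with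
  | nil => intro done G _ _; simp [List.foldl]
  | cons b rest ih =>
    intro done G hfresh hnodup
    simp only [List.foldl_cons]
    rw [insert_dictOf_not_mem done G (hfresh b (List.mem_cons_self ..)) (F b)]
    rw [ih (done ++ [b]) _
        (fun a ha => by
          have hb : a ≠ b := fun h => (List.nodup_cons.mp hnodup).1 (h ▸ ha)
          simp [List.mem_append, hb, hfresh a (List.mem_cons_of_mem _ ha)])
        (List.nodup_cons.mp hnodup).2]
    rw [List.append_cons done b rest]
    congr 1
    funext x
    by_cases hx : x = b
    · subst hx
      have : x ∉ rest := (List.nodup_cons.mp hnodup).1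
      simp [this]
    · simp [hx, List.mem_cons]

/-- A's interleaved pair-fold splits into independent candidate and count folds. -/
theorem foldA_pair (l : List (List String × List String))
    (c : PySem.Dict String (PySem.Set String)) (m : PySem.Dict String Int) :
    l.foldl (fun (st : PySem.Dict String (PySem.Set String) × PySem.Dict String Int) p =>
        let ings := PySem.Set.ofList p.1
        let cands := p.2.foldl (fun c a =>
          match PySem.Dict.get? c a with
          | some s => PySem.Dict.insert c a (PySem.Set.inter s ings)
          | none   => PySem.Dict.insert c a ings) st.1
        let counts := p.1.foldl (fun m i => PySem.Dict.insert m i (PySem.Dict.getD m i 0 + 1)) st.2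
        (cands, counts)) (c, m)
      = (l.foldl (fun c p => p.2.foldl (fun c a =>
            match PySem.Dict.get? c a with
            | some s => PySem.Dict.insert c a (PySem.Set.inter s (PySem.Set.ofList p.1))
            | none   => PySem.Dict.insert c a (PySem.Set.ofList p.1)) c) c,
         l.foldl (fun m p => p.1.foldl (fun m i => PySem.Dict.insert m i (PySem.Dict.getD m i 0 + 1)) m) m) := by
  induction l generalizing c m with
  | nil => rfl
  | cons p rest ih =>
    simp only [List.foldl_cons]
    exact ih _ _

-- ===== VERDICT (by name: the statement is the Claim_ definition above) =====
theorem process_spec : Claim_equal_process := by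
  intro input _
  show process input = process_alt input
  unfold process process_alt
  rw [foldA_pair, candsA_eq]
  have hB : (keysOrder input).foldl
      (fun (d : PySem.Dict String (PySem.Set String)) a =>
        let sets := input.filterMap (fun p =>
          if p.2.contains a then some (PySem.Set.ofList p.1) else none)
        PySem.Dict.insert d a (redB sets)) PySem.Dict.empty
      = dictOf (keysOrder input) (interAll input) := by
    have h := foldl_insert_fresh (interAll input) (keysOrder input) [] (interAll input)
      (by simp) (nodup_keysOrder input)
    simp only [List.nil_append] at h
    have heq : dictOf (keysOrder input)
        (fun x => if x ∈ keysOrder input then interAll input x else interAll input x)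
        = dictOf (keysOrder input) (interAll input) := by
      congr 1; funext x; by_cases hx : x ∈ keysOrder input <;> simp [hx]
    exact h.trans heq
  exact congrArg (fun d : PySem.Dict String (PySem.Set String) =>
    (d.items, (input.foldl (fun (m : PySem.Dict String Int) p =>
      p.1.foldl (fun m i => PySem.Dict.insert m i (PySem.Dict.getD m i 0 + 1)) m)
      PySem.Dict.empty).items)) hB.symm
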